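-- pv_equiv track=rewrite | github.com/abhishekkamal96/courses | algorithms_on_string/assignment/assignment1/trie_matching_extended/trie_matching_extended.py | solve
-- ===== SOURCE A (Python) =====
-- def build_trie(patterns):
--     tree = dict()
--     # write your code here
--     # tree = {0:{'A':1,'T':2},1:{'C':3}}]
--     tree[0] = {}
--     node_count = 1
--     for pattern in patterns:
--         cnode = 0
--         for char in pattern:
--             if char in tree.get(cnode, {}):
--                 cnode = tree[cnode].get(char)
--             else:
--                 if tree.get(cnode):
--                     tree[cnode][char] = node_count
--                 else:
--                     node = {char: node_count}
--                     tree[cnode] = node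
--                 cnode = node_count
--                 node_count += 1
--     return tree
--
-- def solve (text, n, patterns):
--     trie = build_trie(patterns)
--     result = []
--     for i in range(len(text)):
--         cnode = 0
--         j = i
--         while True and j < len(text):
--             char = text[j]
--             if "$" in trie.get(cnode, {}):
--                 result.append(i)
--                 break
--             elif char in trie.get(cnode, {}):
--                 cnode = trie.get(cnode).get(char)
--                 j += 1
--                 if "$" in trie.get(cnode, {}):
--                     result.append(i)
--                     break
--             else:
--                 break
--
--     return result
-- ===== SOURCE B (Python) =====
-- def solve(text, n, patterns):
--     # collect the prefix before every '$' occurrence in every pattern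
--     qs = [p[:k] for p in patterns for k in range(len(p)) if p[k] == '$']
--     return [i for i in range(len(text)) if any(text.startswith(q, i) for q in qs)]
-- ===== Notes on version B (the rewrite author's own statement) =====
-- stated objective: simpler
-- what changed: B drops the trie entirely: it collects the prefix before every '$' occurrence in every pattern and, for each text position i, tests text.startswith(prefix, i) directly.
import Mathlib
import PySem

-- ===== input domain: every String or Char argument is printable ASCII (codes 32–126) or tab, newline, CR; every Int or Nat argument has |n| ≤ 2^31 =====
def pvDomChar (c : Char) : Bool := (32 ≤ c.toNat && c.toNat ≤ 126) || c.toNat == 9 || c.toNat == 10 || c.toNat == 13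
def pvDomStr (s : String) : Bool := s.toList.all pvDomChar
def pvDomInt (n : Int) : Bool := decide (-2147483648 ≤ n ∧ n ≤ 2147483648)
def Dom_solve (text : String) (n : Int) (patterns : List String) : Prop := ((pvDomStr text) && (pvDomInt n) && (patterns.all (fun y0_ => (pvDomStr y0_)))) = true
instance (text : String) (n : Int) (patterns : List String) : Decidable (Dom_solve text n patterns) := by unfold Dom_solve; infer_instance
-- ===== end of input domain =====

-- B replaces A's hand-built trie by a direct prefix test against the '$'-terminated
-- pattern prefixes (simpler; same return value).


-- ===== PORT A =====
-- One character of build_trie's inner loop; state is (tree, node_count, cnode).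
-- 'tree[cnode].get(char)' is reached only under 'char in tree.get(cnode, {})', so the
-- guarded lookup is ported through the same '(tree.get? cnode).getD empty' dict.
-- 'if tree.get(cnode):' (Python truthiness: key present AND dict non-empty) is
-- 'size ≠ 0' of that same defaulted dict.
def buildTrieStep (st : PySem.Dict Int (PySem.Dict Char Int) × Int × Int) (char : Char) :
    PySem.Dict Int (PySem.Dict Char Int) × Int × Int :=
  let tree := st.1
  let nodeCount := st.2.1
  let cnode := st.2.2
  let children := (tree.get? cnode).getD PySem.Dict.empty
  match children.get? char with
  | some v => (tree, nodeCount, v)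
  | none =>
      let tree' :=
        if children.size ≠ 0 then
          -- tree[cnode][char] = node_count  (in-place update of the inner dict)
          tree.insert cnode (children.insert char nodeCount)
        else
          -- tree[cnode] = {char: node_count}
          tree.insert cnode ((PySem.Dict.empty : PySem.Dict Char Int).insert char nodeCount)
      (tree', nodeCount + 1, nodeCount)

def buildTrie (patterns : List String) : PySem.Dict Int (PySem.Dict Char Int) :=
  -- tree = dict(); tree[0] = {}; node_count = 1
  let tree0 := (PySem.Dict.empty : PySem.Dict Int (PySem.Dict Char Int)).insert 0 PySem.Dict.empty
  (patterns.foldl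
    (fun st pattern =>
      let st' := pattern.toList.foldl buildTrieStep (st.1, st.2, 0)
      (st'.1, st'.2.1))
    (tree0, 1)).1

-- The 'while True and j < len(text)' loop of solve for one start position i;
-- 'result.append(i); break' returns result ++ [i], a plain 'break' returns result.
def walkA (trie : PySem.Dict Int (PySem.Dict Char Int)) (cs : List Char)
    (cnode : Int) (j : Nat) (i : Int) (result : List Int) : List Int :=
  if h : j < cs.length then
    let char := cs[j]
    if ((trie.get? cnode).getD PySem.Dict.empty).contains '$' then result ++ [i]
    else
      match ((trie.get? cnode).getD PySem.Dict.empty).get? char with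
      | some v =>
          if ((trie.get? v).getD PySem.Dict.empty).contains '$' then result ++ [i]
          else walkA trie cs v (j + 1) i result
      | none => result
  else result
termination_by cs.length - j

def solve (text : String) (n : Int) (patterns : List String) : List Int :=
  let trie := buildTrie patterns
  -- for i in range(len(text)): … ; i ≥ 0 on the range, so text[j] is the plain Nat index i.toNat
  (PySem.List.pyRange 0 (text.toList.length : Int) 1).foldl
    (fun result i => walkA trie text.toList 0 i.toNat i result) []

-- ===== PORT B =====
-- qs = [p[:k] for p in patterns for k in range(len(p)) if p[k] == '$']
def qsOf (patterns : List String) : List (List Char) :=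
  patterns.flatMap (fun p =>
    (List.range p.toList.length).filterMap (fun k =>
      if p.toList[k]? = some '$' then some (p.toList.take k) else none))

def solve_alt (text : String) (n : Int) (patterns : List String) : List Int :=
  let qs := qsOf patterns
  -- text.startswith(q, i) with 0 ≤ i ≤ len(text) is exactly: q is a prefix of text[i:]
  (List.range text.toList.length).filterMap (fun i =>
    if qs.any (fun q => PySem.Chars.startswith (text.toList.drop i) q) then some (i : Int) else none)

-- ===== PRECONDITION & SPEC =====
def Spec_solve (text : String) (n : Int) (patterns : List String) (out : List Int) : Prop := out = solve_alt text n patterns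
instance (text : String) (n : Int) (patterns : List String) (out : List Int) : Decidable (Spec_solve text n patterns out) := by unfold Spec_solve; infer_instance

-- ===== CLAIM (what is proved, stated in full; the proofs are below) =====
def Claim_equal_solve : Prop := ∀ (text : String) (n : Int) (patterns : List String), Dom_solve text n patterns → Spec_solve text n patterns (solve text n patterns)

-- ===== LEMMAS AND PROOFS =====

-- The edge function of the trie: EdgeF t u c = tree.get(u, {}).get(c).
def EdgeF (t : PySem.Dict Int (PySem.Dict Char Int)) (u : Int) (c : Char) : Option Int :=
  ((t.get? u).getD PySem.Dict.empty).get? c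

-- Trie invariant, over an abstract node-set predicate NS (the strings owning a node)
-- and a ghost labelling id of node ids.
def TrieInvP (t : PySem.Dict Int (PySem.Dict Char Int)) (nc : Int)
    (NS : List Char → Prop) (id : List Char → Int) : Prop :=
  id [] = 0 ∧ NS [] ∧
  (∀ a b, NS (a ++ b) → NS a) ∧
  (∀ s, NS s → id s < nc) ∧
  (∀ s t', NS s → NS t' → id s = id t' → s = t') ∧
  (∀ s c, NS s → NS (s ++ [c]) → EdgeF t (id s) c = some (id (s ++ [c]))) ∧
  (∀ s c, NS s → ¬ NS (s ++ [c]) → EdgeF t (id s) c = none) ∧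
  (∀ u c v, EdgeF t u c = some v → ∃ s, NS s ∧ NS (s ++ [c]) ∧ u = id s ∧ v = id (s ++ [c]))

lemma TrieInvP_congr {t : PySem.Dict Int (PySem.Dict Char Int)} {nc : Int}
    {NS1 NS2 : List Char → Prop} {id : List Char → Int}
    (h : ∀ s, NS1 s ↔ NS2 s) (hI : TrieInvP t nc NS1 id) : TrieInvP t nc NS2 id := by
  have : NS1 = NS2 := funext fun s => propext (h s)
  exact this ▸ hI

lemma EdgeF_insert (t : PySem.Dict Int (PySem.Dict Char Int)) (u : Int)
    (d : PySem.Dict Char Int) (u' : Int) (c' : Char) :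
    EdgeF (t.insert u d) u' c' = if u' = u then d.get? c' else EdgeF t u' c' := by
  unfold EdgeF
  rw [PySem.Dict.get?_insert]
  split_ifs with h <;> simp

lemma get?_of_size_zero (d : PySem.Dict Char Int) (h : d.size = 0) (c : Char) :
    d.get? c = none := by
  have hitems : d.items = [] := List.length_eq_zero_iff.mp h
  have : d = PySem.Dict.mk [] := PySem.Dict.ext hitems
  subst this
  rfl

-- Pointwise effect of the `none` branch of buildTrieStep, whatever the truthiness test does.
lemma buildTrieStep_none_edge {t : PySem.Dict Int (PySem.Dict Char Int)} {nc u : Int} {c : Char}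
    (h : EdgeF t u c = none) :
    (buildTrieStep (t, nc, u) c).2 = (nc + 1, nc) ∧
    (∀ u' c', EdgeF (buildTrieStep (t, nc, u) c).1 u' c' =
      if u' = u ∧ c' = c then some nc else EdgeF t u' c') := by
  unfold buildTrieStep
  simp only [EdgeF] at h
  simp only [h]
  constructor
  · first | trivial | (split <;> rfl)
  · intro u' c'
    split
    case isTrue hsz =>
      rw [EdgeF_insert]
      by_cases hu : u' = u
      · subst hu
        rw [if_pos rfl, PySem.Dict.get?_insert]
        by_cases hc : c' = c
        · subst hc
          rw [if_pos rfl, if_pos ⟨rfl, rfl⟩]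
        · rw [if_neg hc, if_neg (fun hp => hc hp.2)]
          rfl
      · rw [if_neg hu, if_neg (fun hp => hu hp.1)]
    case isFalse hsz =>
      rw [EdgeF_insert]
      by_cases hu : u' = u
      · subst hu
        rw [if_pos rfl, PySem.Dict.get?_insert]
        by_cases hc : c' = c
        · subst hc
          rw [if_pos rfl, if_pos ⟨rfl, rfl⟩]
        · rw [if_neg hc, if_neg (fun hp => hc hp.2), PySem.Dict.get?_empty]
          unfold EdgeF
          rw [get?_of_size_zero _ (by omega) c']
      · rw [if_neg hu, if_neg (fun hp => hu hp.1)]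

lemma buildTrieStep_some {t : PySem.Dict Int (PySem.Dict Char Int)} {nc u v : Int} {c : Char}
    (h : EdgeF t u c = some v) : buildTrieStep (t, nc, u) c = (t, nc, v) := by
  unfold buildTrieStep
  simp only [EdgeF] at h
  simp [h]

-- The ghost labelling extended with the fresh node nc for the string r ++ [c].
def idExt (id : List Char → Int) (rc : List Char) (nc : Int) : List Char → Int :=
  fun s => if s = rc then nc else id s

lemma idExt_self (id : List Char → Int) (rc : List Char) (nc : Int) :
    idExt id rc nc rc = nc := if_pos rfl

lemma idExt_of_ne {s rc : List Char} (id : List Char → Int) (nc : Int) (h : s ≠ rc) :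
    idExt id rc nc s = id s := if_neg h

lemma prefix_single {w : List Char} {c : Char} (h : w <+: [c]) : w = [] ∨ w = [c] := by
  cases w with
  | nil => exact Or.inl rfl
  | cons a w' =>
      obtain ⟨u, hu⟩ := h
      simp only [List.cons_append] at hu
      obtain ⟨ha, hw⟩ := List.cons.inj hu
      right
      rw [ha]
      have := List.append_eq_nil_iff.mp hw
      rw [this.1]

lemma prefix_antisymm {s r : List Char} (h1 : r <+: s) (h2 : s <+: r) : s = r :=
  h2.eq_of_length_le h1.length_le

lemma prefix_split {s r cs : List Char}
    (h : s <+: r ++ cs) : s <+: r ∨ ∃ w, w <+: cs ∧ s = r ++ w := by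
  rcases Nat.le_total s.length r.length with hle | hge
  · exact Or.inl (List.prefix_of_prefix_length_le h (List.prefix_append r cs) hle)
  · right
    have hr : r <+: s :=
      List.prefix_of_prefix_length_le (List.prefix_append r cs) h hge
    obtain ⟨w, rfl⟩ := hr
    refine ⟨w, ?_, rfl⟩
    obtain ⟨u, hu⟩ := h
    rw [List.append_assoc] at hu
    exact ⟨u, List.append_cancel_left hu⟩

-- One character of the insertion loop preserves the invariant, extending the node set
-- by (at most) the one new string r ++ [c].
lemma step_char {t : PySem.Dict Int (PySem.Dict Char Int)} {nc : Int}
    {NS : List Char → Prop} {id : List Char → Int} {r : List Char} (c : Char)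
    (hInv : TrieInvP t nc NS id) (hr : NS r) :
    ∃ id', TrieInvP (buildTrieStep (t, nc, id r) c).1 (buildTrieStep (t, nc, id r) c).2.1
        (fun s => NS s ∨ s = r ++ [c]) id' ∧
      (buildTrieStep (t, nc, id r) c).2.2 = id' (r ++ [c]) := by
  obtain ⟨hid0, hNSnil, hcl, hlt, hinj, hfwd, hneg, hbwd⟩ := hInv
  by_cases hmem : NS (r ++ [c])
  · -- the edge already exists; nothing changes
    rw [buildTrieStep_some (hfwd r c hr hmem)]
    refine ⟨id, ?_, rfl⟩
    refine TrieInvP_congr (NS1 := NS) (fun s => ?_)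
      ⟨hid0, hNSnil, hcl, hlt, hinj, hfwd, hneg, hbwd⟩
    constructor
    · exact Or.inl
    · rintro (h | rfl)
      · exact h
      · exact hmem
  · -- fresh node nc, fresh edge (id r, c) ↦ nc
    have hedge := hneg r c hr hmem
    obtain ⟨hpair, hE⟩ := buildTrieStep_none_edge hedge
    have hnc1 : (buildTrieStep (t, nc, id r) c).2.1 = nc + 1 := by rw [hpair]
    have hcn : (buildTrieStep (t, nc, id r) c).2.2 = nc := by rw [hpair]
    have hne : ∀ s, NS s → s ≠ r ++ [c] := fun s hs hh => hmem (hh ▸ hs)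
    refine ⟨idExt id (r ++ [c]) nc, ?_, ?_⟩
    · rw [hnc1]
      refine ⟨?_, Or.inl hNSnil, ?_, ?_, ?_, ?_, ?_, ?_⟩
      · rw [idExt_of_ne id nc (by simp)]
        exact hid0
      · -- prefix closure of the extended set
        rintro a b (hab | hab)
        · exact Or.inl (hcl a b hab)
        · rcases prefix_split (s := a) (r := r) (cs := [c]) ⟨b, hab⟩
            with ha | ⟨w, hw, rfl⟩
          · obtain ⟨w, rfl⟩ := ha
            exact Or.inl (hcl a w hr)
          · rcases prefix_single hw with rfl | rfl
            · exact Or.inl (by simpa using hr)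
            · exact Or.inr rfl
      · rintro s (hs | rfl)
        · rw [idExt_of_ne id nc (hne s hs)]
          have := hlt s hs; omega
        · rw [idExt_self]; omega
      · rintro s t' (hs | rfl) (ht | rfl) heq
        · rw [idExt_of_ne id nc (hne s hs), idExt_of_ne id nc (hne t' ht)] at heq
          exact hinj s t' hs ht heq
        · rw [idExt_of_ne id nc (hne s hs), idExt_self] at heq
          exact absurd (hlt s hs) (by omega)
        · rw [idExt_self, idExt_of_ne id nc (hne t' ht)] at heq
          exact absurd (hlt t' ht) (by omega)
        · rfl
      · -- forward edges (present)
        rintro s c' (hs | rfl) hsc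
        · rw [idExt_of_ne id nc (hne s hs), hE]
          rcases hsc with hsc | hnew
          · rw [if_neg ?_, hfwd s c' hs hsc, idExt_of_ne id nc (hne _ hsc)]
            rintro ⟨h1, rfl⟩
            exact hmem (hinj s r hs hr h1 ▸ hsc)
          · have hs' : s = r ∧ c' = c := by
              have := List.append_inj' hnew rfl
              exact ⟨this.1, by simpa using this.2⟩
            obtain ⟨rfl, rfl⟩ := hs'
            rw [if_pos ⟨rfl, rfl⟩, idExt_self]
        · -- no extension of the brand-new node is in the new set
          exfalso
          rcases hsc with hsc | hbad
          · exact hmem (hcl (r ++ [c]) [c'] hsc)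
          · have : (r ++ [c] ++ [c']).length = (r ++ [c]).length := by rw [hbad]
            simp at this
      · -- forward edges (absent)
        rintro s c' (hs | rfl) hsc
        · rw [idExt_of_ne id nc (hne s hs), hE]
          rw [if_neg ?_, hneg s c' hs (fun h => hsc (Or.inl h))]
          rintro ⟨h1, rfl⟩
          exact hsc (Or.inr (by rw [hinj s r hs hr h1]))
        · rw [idExt_self, hE]
          rw [if_neg (by rintro ⟨h1, _⟩; have := hlt r hr; omega)]
          cases hEnc : EdgeF t nc c' with
          | none => rfl
          | some v =>
              obtain ⟨s, hsNS, _, hu, _⟩ := hbwd nc c' v hEnc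
              have := hlt s hsNS
              omega
      · -- backward edges
        intro u c' v hEv
        rw [hE] at hEv
        by_cases hkey : u = id r ∧ c' = c
        · obtain ⟨rfl, rfl⟩ := hkey
          have hv : v = nc := by rw [if_pos ⟨rfl, rfl⟩] at hEv; exact (Option.some.inj hEv).symm
          exact ⟨r, Or.inl hr, Or.inr rfl,
            (idExt_of_ne id nc (hne r hr)).symm, by rw [hv, idExt_self]⟩
        · rw [if_neg hkey] at hEv
          obtain ⟨s, hsNS, hscNS, rfl, rfl⟩ := hbwd u c' v hEv
          exact ⟨s, Or.inl hsNS, Or.inl hscNS,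
            (idExt_of_ne id nc (hne s hsNS)).symm, (idExt_of_ne id nc (hne _ hscNS)).symm⟩
    · rw [hcn, idExt_self]

-- Inserting the whole remaining pattern cs, starting from the node of r.
lemma fold_pattern (cs : List Char) :
    ∀ (t : PySem.Dict Int (PySem.Dict Char Int)) (nc : Int)
      (NS : List Char → Prop) (id : List Char → Int) (r : List Char),
      TrieInvP t nc NS id → NS r →
      ∃ id', TrieInvP ((cs.foldl buildTrieStep (t, nc, id r)).1)
          ((cs.foldl buildTrieStep (t, nc, id r)).2.1)
          (fun s => NS s ∨ (r <+: s ∧ s <+: r ++ cs)) id' := by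
  induction cs with
  | nil =>
      intro t nc NS id r hInv hr
      refine ⟨id, TrieInvP_congr (fun s => ?_) hInv⟩
      constructor
      · exact Or.inl
      · rintro (h | ⟨h1, h2⟩)
        · exact h
        · simp only [List.append_nil] at h2
          exact (prefix_antisymm h1 h2) ▸ hr
  | cons c cs ih =>
      intro t nc NS id r hInv hr
      obtain ⟨id1, hInv1, hcnode⟩ := step_char c hInv hr
      obtain ⟨id2, hInv2⟩ := ih _ _ _ id1 (r ++ [c]) hInv1 (Or.inr rfl)
      rw [← hcnode] at hInv2
      refine ⟨id2, TrieInvP_congr (fun s => ?_)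
        (by simpa only [List.foldl_cons] using hInv2)⟩
      constructor
      · rintro ((h | rfl) | ⟨h1, h2⟩)
        · exact Or.inl h
        · exact Or.inr ⟨List.prefix_append r [c], ⟨cs, by simp⟩⟩
        · refine Or.inr ⟨(List.prefix_append r [c]).trans h1, ?_⟩
          rw [show r ++ c :: cs = (r ++ [c]) ++ cs by simp]
          obtain ⟨u, hu⟩ := h2
          exact ⟨u, by rw [List.append_assoc]; simpa using hu⟩
      · rintro (h | ⟨h1, h2⟩)
        · exact Or.inl (Or.inl h)
        · have h2' : s <+: (r ++ [c]) ++ cs := by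
            rw [show (r ++ [c]) ++ cs = r ++ c :: cs by simp]
            exact h2
          rcases prefix_split h2' with hs | ⟨w, hw, rfl⟩
          · rcases prefix_split hs with hs' | ⟨w, hw, rfl⟩
            · exact Or.inl (Or.inl ((prefix_antisymm h1 hs') ▸ hr))
            · rcases prefix_single hw with rfl | rfl
              · exact Or.inl (Or.inl (by simpa using hr))
              · exact Or.inl (Or.inr rfl)
          · refine Or.inr ⟨List.prefix_append (r ++ [c]) w, ?_⟩
            obtain ⟨u, hu⟩ := hw
            exact ⟨u, by simp [← hu]⟩

-- The initial tree {0: {}} with node_count 1 satisfies the invariant for NS = {""}.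
lemma init_inv : TrieInvP
    ((PySem.Dict.empty : PySem.Dict Int (PySem.Dict Char Int)).insert 0 PySem.Dict.empty)
    1 (fun s => s = []) (fun _ => 0) := by
  refine ⟨rfl, rfl, ?_, ?_, ?_, ?_, ?_, ?_⟩
  · rintro a b hab
    exact (List.append_eq_nil_iff.mp hab).1
  · rintro s rfl
    show (0 : Int) < 1
    omega
  · rintro s t' rfl rfl _; rfl
  · rintro s c rfl h
    exact absurd h (by simp)
  · rintro s c rfl _
    rw [EdgeF_insert, if_pos rfl]
    rfl
  · intro u c v h
    rw [EdgeF_insert] at h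
    by_cases hu : u = 0
    · rw [if_pos hu] at h
      exact absurd h (by simp [PySem.Dict.get?_empty])
    · rw [if_neg hu] at h
      exact absurd h (by simp [EdgeF, PySem.Dict.get?_empty])

-- Folding build_trie's outer loop over the remaining patterns.
lemma fold_outer (ps : List String) :
    ∀ (t : PySem.Dict Int (PySem.Dict Char Int)) (nc : Int)
      (NS : List Char → Prop) (id : List Char → Int),
      TrieInvP t nc NS id →
      ∃ id', TrieInvP
          ((ps.foldl (fun st pattern =>
              let st' := pattern.toList.foldl buildTrieStep (st.1, st.2, 0)
              (st'.1, st'.2.1)) (t, nc)).1)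
          ((ps.foldl (fun st pattern =>
              let st' := pattern.toList.foldl buildTrieStep (st.1, st.2, 0)
              (st'.1, st'.2.1)) (t, nc)).2)
          (fun s => NS s ∨ ∃ p ∈ ps, s <+: p.toList) id' := by
  induction ps with
  | nil =>
      intro t nc NS id h
      exact ⟨id, TrieInvP_congr (fun s => by simp) h⟩
  | cons p ps ih =>
      intro t nc NS id h
      obtain ⟨id1, h1⟩ := fold_pattern p.toList t nc NS id [] h h.2.1
      rw [h.1] at h1
      obtain ⟨id2, h2⟩ := ih _ _ _ id1 h1
      refine ⟨id2, TrieInvP_congr (fun s => ?_)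
        (by simpa only [List.foldl_cons] using h2)⟩
      constructor
      · rintro ((h | ⟨_, h2'⟩) | ⟨q, hq, hpre⟩)
        · exact Or.inl h
        · exact Or.inr ⟨p, List.mem_cons_self .., by simpa using h2'⟩
        · exact Or.inr ⟨q, List.mem_cons_of_mem p hq, hpre⟩
      · rintro (h | ⟨q, hq, hpre⟩)
        · exact Or.inl (Or.inl h)
        · rcases List.mem_cons.mp hq with rfl | hq'
          · exact Or.inl (Or.inr ⟨List.nil_prefix, by simpa using hpre⟩)
          · exact Or.inr ⟨q, hq', hpre⟩

-- The node set of the finished trie.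
def NSfin (patterns : List String) (s : List Char) : Prop :=
  s = [] ∨ ∃ p ∈ patterns, s <+: p.toList

lemma buildTrie_inv (patterns : List String) :
    ∃ nc id, TrieInvP (buildTrie patterns) nc (NSfin patterns) id := by
  obtain ⟨id', h⟩ := fold_outer patterns
    ((PySem.Dict.empty : PySem.Dict Int (PySem.Dict Char Int)).insert 0 PySem.Dict.empty)
    1 (fun s => s = []) (fun _ => 0) init_inv
  exact ⟨_, id', TrieInvP_congr (fun s => Iff.rfl) h⟩

-- Where the walk from the node of s appends: a '$'-terminated continuation of s fits.
def Matches (patterns : List String) (cs : List Char) (j : Nat) (s : List Char) : Prop :=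
  ∃ k, j + k ≤ cs.length ∧ NSfin patterns (s ++ (cs.drop j).take k ++ ['$'])

lemma contains_dollar_eq {trie : PySem.Dict Int (PySem.Dict Char Int)} (u : Int) :
    ((trie.get? u).getD PySem.Dict.empty).contains '$' = (EdgeF trie u '$').isSome :=
  PySem.Dict.contains_eq_isSome_get? _ _

lemma drop_cons_of_lt (cs : List Char) (j : Nat) (h : j < cs.length) :
    cs.drop j = cs[j] :: cs.drop (j + 1) := List.drop_eq_getElem_cons h

lemma take_succ_drop (cs : List Char) (j k : Nat) (h : j < cs.length) :
    (cs.drop j).take (k + 1) = cs[j] :: (cs.drop (j + 1)).take k := by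
  rw [drop_cons_of_lt cs j h, List.take_succ_cons]

lemma walk_pos {patterns : List String} {trie : PySem.Dict Int (PySem.Dict Char Int)}
    {nc : Int} {id : List Char → Int} (hInv : TrieInvP trie nc (NSfin patterns) id)
    (cs : List Char) (i : Int) :
    ∀ m j s res, cs.length - j ≤ m → NSfin patterns s → j < cs.length →
      Matches patterns cs j s → walkA trie cs (id s) j i res = res ++ [i] := by
  obtain ⟨hid0, hNSnil, hcl, hlt, hinj, hfwd, hneg, hbwd⟩ := hInv
  intro m
  induction m with
  | zero => intro j s res hm _ hj _; omega
  | succ m ih =>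
      intro j s res hm hNSs hj hM
      rw [walkA, dif_pos hj]
      by_cases hdol : NSfin patterns (s ++ ['$'])
      · have hcT : ((trie.get? (id s)).getD PySem.Dict.empty).contains '$' = true := by
          rw [contains_dollar_eq, hfwd s '$' hNSs hdol]
          rfl
        simp only [hcT, if_true]
      · have hcF : ((trie.get? (id s)).getD PySem.Dict.empty).contains '$' = false := by
          rw [contains_dollar_eq, hneg s '$' hNSs hdol]
          rfl
        simp only [hcF, Bool.false_eq_true, if_false]
        obtain ⟨k, hk, hNSk⟩ := hM
        cases k with
        | zero =>
            exfalso
            apply hdol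
            simpa using hNSk
        | succ k' =>
            rw [drop_cons_of_lt cs j hj, List.take_succ_cons] at hNSk
            have hNSc : NSfin patterns (s ++ [cs[j]]) := by
              apply hcl (s ++ [cs[j]]) ((cs.drop (j + 1)).take k' ++ ['$'])
              simpa [List.append_assoc] using hNSk
            have hedge : ((trie.get? (id s)).getD PySem.Dict.empty).get? cs[j] =
                some (id (s ++ [cs[j]])) := hfwd s cs[j] hNSs hNSc
            simp only [hedge]
            by_cases hdol2 : NSfin patterns (s ++ [cs[j]] ++ ['$'])
            · have hcT2 : ((trie.get? (id (s ++ [cs[j]]))).getD PySem.Dict.empty).contains '$'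
                  = true := by
                rw [contains_dollar_eq, hfwd (s ++ [cs[j]]) '$' hNSc hdol2]
                rfl
              simp only [hcT2, if_true]
            · have hcF2 : ((trie.get? (id (s ++ [cs[j]]))).getD PySem.Dict.empty).contains '$'
                  = false := by
                rw [contains_dollar_eq, hneg (s ++ [cs[j]]) '$' hNSc hdol2]
                rfl
              simp only [hcF2, Bool.false_eq_true, if_false]
              cases k' with
              | zero =>
                  exfalso
                  apply hdol2
                  simpa [List.append_assoc] using hNSk
              | succ k'' =>
                  apply ih (j + 1) (s ++ [cs[j]]) res (by omega) hNSc (by omega)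
                  exact ⟨k'' + 1, by omega, by simpa [List.append_assoc] using hNSk⟩

lemma walk_neg {patterns : List String} {trie : PySem.Dict Int (PySem.Dict Char Int)}
    {nc : Int} {id : List Char → Int} (hInv : TrieInvP trie nc (NSfin patterns) id)
    (cs : List Char) (i : Int) :
    ∀ m j s res, cs.length - j ≤ m → NSfin patterns s →
      ¬ Matches patterns cs j s → walkA trie cs (id s) j i res = res := by
  obtain ⟨hid0, hNSnil, hcl, hlt, hinj, hfwd, hneg, hbwd⟩ := hInv
  intro m
  induction m with
  | zero =>
      intro j s res hm _ _
      rw [walkA, dif_neg (by omega)]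
  | succ m ih =>
      intro j s res hm hNSs hM
      by_cases hj : j < cs.length
      · rw [walkA, dif_pos hj]
        have hdol : ¬ NSfin patterns (s ++ ['$']) := by
          intro h
          exact hM ⟨0, by omega, by simpa using h⟩
        have hcF : ((trie.get? (id s)).getD PySem.Dict.empty).contains '$' = false := by
          rw [contains_dollar_eq, hneg s '$' hNSs hdol]
          rfl
        simp only [hcF, Bool.false_eq_true, if_false]
        by_cases hNSc : NSfin patterns (s ++ [cs[j]])
        · have hedge : ((trie.get? (id s)).getD PySem.Dict.empty).get? cs[j] =
              some (id (s ++ [cs[j]])) := hfwd s cs[j] hNSs hNSc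
          simp only [hedge]
          have hdol2 : ¬ NSfin patterns (s ++ [cs[j]] ++ ['$']) := by
            intro h
            apply hM
            refine ⟨0 + 1, by omega, ?_⟩
            rw [take_succ_drop cs j 0 hj]
            simpa [List.append_assoc] using h
          have hcF2 : ((trie.get? (id (s ++ [cs[j]]))).getD PySem.Dict.empty).contains '$'
              = false := by
            rw [contains_dollar_eq, hneg (s ++ [cs[j]]) '$' hNSc hdol2]
            rfl
          simp only [hcF2, Bool.false_eq_true, if_false]
          apply ih (j + 1) (s ++ [cs[j]]) res (by omega) hNSc
          intro ⟨k', hk', hNSk'⟩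
          apply hM
          refine ⟨k' + 1, by omega, ?_⟩
          rw [take_succ_drop cs j k' hj]
          simpa [List.append_assoc] using hNSk'
        · have hedge : ((trie.get? (id s)).getD PySem.Dict.empty).get? cs[j] = none :=
            hneg s cs[j] hNSs hNSc
          simp only [hedge]
      · rw [walkA, dif_neg hj]

lemma mem_qsOf {patterns : List String} {q : List Char} :
    q ∈ qsOf patterns ↔
      ∃ p ∈ patterns, ∃ k, p.toList[k]? = some '$' ∧ q = p.toList.take k := by
  unfold qsOf
  simp only [List.mem_flatMap, List.mem_filterMap, List.mem_range]
  constructor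
  · rintro ⟨p, hp, k, hk, hq⟩
    split at hq
    · next h => exact ⟨p, hp, k, h, (Option.some.inj hq).symm⟩
    · exact absurd hq (by simp)
  · rintro ⟨p, hp, k, hk, rfl⟩
    have hklt : k < p.toList.length := by
      by_contra hge
      rw [List.getElem?_eq_none (by omega)] at hk
      exact absurd hk (by simp)
    exact ⟨p, hp, k, hklt, by rw [if_pos hk]⟩

lemma bridge {patterns : List String} {cs : List Char} (i : Nat) (hi : i < cs.length) :
    ((qsOf patterns).any (fun q => PySem.Chars.startswith (cs.drop i) q) = true) ↔
      Matches patterns cs i [] := by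
  rw [List.any_eq_true]
  constructor
  · rintro ⟨q, hq, hsw⟩
    rw [PySem.Chars.startswith_iff] at hsw
    obtain ⟨p, hp, k, hk, rfl⟩ := mem_qsOf.mp hq
    have hklt : k < p.toList.length := by
      by_contra hge
      rw [List.getElem?_eq_none (by omega)] at hk
      exact absurd hk (by simp)
    have hlen : (p.toList.take k).length = k := by
      rw [List.length_take]
      omega
    have hle : k ≤ cs.length - i := by
      have := hsw.length_le
      rw [hlen, List.length_drop] at this
      omega
    refine ⟨k, by omega, Or.inr ⟨p, hp, ?_⟩⟩
    have htk : (cs.drop i).take k = p.toList.take k := by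
      obtain ⟨u, hu⟩ := hsw
      rw [← hu, List.take_append_of_le_length (by omega), List.take_of_length_le (by omega)]
    rw [List.nil_append, htk]
    have : p.toList.take k ++ ['$'] = p.toList.take (k + 1) := by
      rw [List.take_add_one, hk]
      rfl
    rw [this]
    exact List.take_prefix (k + 1) p.toList
  · rintro ⟨k, hk, hNS⟩
    rw [List.nil_append] at hNS
    rcases hNS with h | ⟨p, hp, hpre⟩
    · exact absurd h (by simp)
    · have hlen : ((cs.drop i).take k).length = k := by
        rw [List.length_take, List.length_drop]
        omega
      refine ⟨(cs.drop i).take k, mem_qsOf.mpr ⟨p, hp, k, ?_, ?_⟩, ?_⟩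
      · -- p[k] = '$'
        obtain ⟨u, hu⟩ := hpre
        rw [← hu, List.append_assoc, List.getElem?_append_right (by omega)]
        simp [hlen]
      · -- the matched piece is p[:k]
        obtain ⟨u, hu⟩ := hpre
        have htake : ((cs.drop i).take k ++ (['$'] ++ u)).take k = (cs.drop i).take k := by
          rw [List.take_append_of_le_length (by omega), List.take_of_length_le (by omega)]
        rw [← hu, List.append_assoc, htake]
      · rw [PySem.Chars.startswith_iff]
        exact List.take_prefix k (cs.drop i)

lemma filterMap_if_eq_map_filter {α β : Type} (p : α → Bool) (f : α → β) (l : List α) :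
    l.filterMap (fun i => if p i then some (f i) else none) = (l.filter p).map f := by
  induction l with
  | nil => rfl
  | cons a l ih =>
      by_cases h : p a <;> simp [List.filterMap_cons, List.filter_cons, h, ih]

-- ===== VERDICT (by name: the statement is the Claim_ definition above) =====
theorem solve_spec : Claim_equal_solve := by
  intro text n patterns _
  unfold Spec_solve solve solve_alt
  dsimp only
  obtain ⟨nc, id, hInv⟩ := buildTrie_inv patterns
  set cs := text.toList with hcs
  rw [PySem.List.pyRange_zero_nat cs.length, List.foldl_map]
  have hid0 : id [] = 0 := hInv.1
  have hfold :
      List.foldl (fun (result : List Int) (k : Nat) =>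
          walkA (buildTrie patterns) cs 0 ((k : Int)).toNat ((k : Int)) result) []
        (List.range cs.length) =
      List.foldl (fun result k =>
        if (qsOf patterns).any (fun q => PySem.Chars.startswith (cs.drop k) q) then
          result ++ [(k : Int)] else result) [] (List.range cs.length) := by
    apply PySem.List.foldl_congr_mem
    intro res k hk
    have hklt : k < cs.length := List.mem_range.mp hk
    have htn : ((k : Int)).toNat = k := Int.toNat_natCast k
    rw [htn, ← hid0]
    by_cases hc : (qsOf patterns).any (fun q => PySem.Chars.startswith (cs.drop k) q) = true
    · rw [if_pos hc]
      exact walk_pos hInv cs (k : Int) (cs.length - k) k [] res (le_refl _)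
        (Or.inl rfl) hklt ((bridge k hklt).mp hc)
    · rw [if_neg hc]
      exact walk_neg hInv cs (k : Int) (cs.length - k) k [] res (le_refl _)
        (Or.inl rfl) (fun hM => hc ((bridge k hklt).mpr hM))
  rw [hfold, PySem.List.foldl_append_if, filterMap_if_eq_map_filter]
  simp
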